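-- pv_equiv track=rewrite | github.com/AdamZhouSE/pythonHomework | Code/CodeRecords/2859/60797/287933.py | find
-- ===== SOURCE A (Python) =====
-- def find(n, data):
--     target = data[0][0]
--     forbid = data[0][1]
--     if target==forbid:
--         return 'NO'
--     for i in range(n):
--         for j in range(n):
--             if i == j or i + j == n - 1:
--                 if data[i][j] == target:
--                     continue
--                 else:
--                     return 'NO'
--             else:
--                 if data[i][j] == forbid:
--                     continue
--                 else:
--                     return 'NO'
--     return 'YES'
-- ===== SOURCE B (Python) =====
-- def find(n, data):
--     target = data[0][0]
--     forbid = data[0][1]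
--     if target == forbid:
--         return 'NO'
--     cells = [(i, j, data[i][j]) for i in range(n) for j in range(n)]
--     if any(v != target and v != forbid for _, _, v in cells):
--         return 'NO'
--     diag = {(i, i) for i in range(n)} | {(i, n - 1 - i) for i in range(n)}
--     got = {(i, j) for i, j, v in cells if v == target}
--     return 'YES' if got == diag else 'NO'
-- ===== Notes on version B (the rewrite author's own statement) =====
-- stated objective: alternative
-- what changed: Instead of A's early-exit double loop testing each cell against a per-cell diagonal branch, B materialises all cells once, rejects any value outside {target,forbid}, and then decides the answer by one set equality: the set of positions holding target must equal the precomputed set of diagonal/anti-diagonal positions.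
-- outside the precondition, e.g. on find(3, [[1, 2, 1], [9]]): A returns 'NO', B raises IndexError
import Mathlib
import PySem

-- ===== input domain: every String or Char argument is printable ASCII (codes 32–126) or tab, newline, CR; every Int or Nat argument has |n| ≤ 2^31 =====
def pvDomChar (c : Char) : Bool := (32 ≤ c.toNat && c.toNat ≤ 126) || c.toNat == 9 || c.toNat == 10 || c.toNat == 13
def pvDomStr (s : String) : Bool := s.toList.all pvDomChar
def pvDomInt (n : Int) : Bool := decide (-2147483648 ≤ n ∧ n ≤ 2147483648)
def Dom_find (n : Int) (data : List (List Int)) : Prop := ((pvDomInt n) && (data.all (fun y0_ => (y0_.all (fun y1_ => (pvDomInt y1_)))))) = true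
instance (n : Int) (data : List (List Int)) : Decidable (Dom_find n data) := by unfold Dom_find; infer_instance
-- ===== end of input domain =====

-- B replaces A's early-exit per-cell branch test by a value check plus ONE set equality: the set of
-- positions holding target must equal the precomputed diagonal/anti-diagonal position set (objective: alternative).


-- ===== PORT A =====
-- data[i][j]; exact whenever the indices are in range, which Pre_find guarantees for every access made
def pvCell (data : List (List Int)) (i j : Int) : Int :=
  PySem.List.pyGetD (PySem.List.pyGetD data i []) j 0

-- inner 'for j' loop of A: true = completed (all cells ok), false = early 'return NO'
def pvRowA (n target forbid : Int) (data : List (List Int)) (i : Int) : List Int → Bool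
  | [] => true
  | j :: js =>
    if i = j ∨ i + j = n - 1 then
      if pvCell data i j = target then pvRowA n target forbid data i js else false
    else
      if pvCell data i j = forbid then pvRowA n target forbid data i js else false

-- outer 'for i' loop of A
def pvLoopA (n target forbid : Int) (data : List (List Int)) : List Int → String
  | [] => "YES"
  | i :: is =>
    if pvRowA n target forbid data i (PySem.List.pyRange 0 n 1) then
      pvLoopA n target forbid data is
    else "NO"

def find (n : Int) (data : List (List Int)) : String :=
  let target := pvCell data 0 0
  let forbid := pvCell data 0 1
  if target = forbid then "NO"
  else pvLoopA n target forbid data (PySem.List.pyRange 0 n 1)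

-- ===== PORT B =====
-- cells = [(i, j, data[i][j]) for i in range(n) for j in range(n)]
def pvCellsB (n : Int) (data : List (List Int)) : List (Int × Int × Int) :=
  (PySem.List.pyRange 0 n 1).flatMap
    (fun i => (PySem.List.pyRange 0 n 1).map (fun j => (i, j, pvCell data i j)))

-- diag = {(i, i) for i in range(n)} | {(i, n - 1 - i) for i in range(n)}
def pvDiagB (n : Int) : PySem.Set (Int × Int) :=
  PySem.Set.union
    (PySem.Set.ofList ((PySem.List.pyRange 0 n 1).map (fun i => (i, i))))
    (PySem.Set.ofList ((PySem.List.pyRange 0 n 1).map (fun i => (i, n - 1 - i))))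

-- got = {(i, j) for i, j, v in cells if v == target}
def pvGotB (cells : List (Int × Int × Int)) (target : Int) : PySem.Set (Int × Int) :=
  PySem.Set.ofList
    (cells.filterMap (fun c => if c.2.2 = target then some (c.1, c.2.1) else none))

def find_alt (n : Int) (data : List (List Int)) : String :=
  let target := pvCell data 0 0
  let forbid := pvCell data 0 1
  if target = forbid then "NO"
  else
    let cells := pvCellsB n data
    if cells.any (fun c => c.2.2 ≠ target ∧ c.2.2 ≠ forbid) then "NO"
    else if PySem.Set.equal (pvGotB cells target) (pvDiagB n) then "YES" else "NO"

-- ===== PRECONDITION & SPEC =====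
-- Pre_ excludes inputs where A raises IndexError (empty data / first row shorter than 2) and ragged or
-- short matrices on which A returns 'NO' only by exiting before reaching a missing cell (B's full scan
-- raises there); matrices whose first row starts with two equal cells are kept regardless of shape.
def Pre_find (n : Int) (data : List (List Int)) : Prop :=
  data ≠ [] ∧ 2 ≤ (data.headD []).length ∧
  ((data.headD []).getD 0 0 = (data.headD []).getD 1 0 ∨
   (n ≤ (data.length : Int) ∧ ∀ row ∈ data.take n.toNat, n ≤ (row.length : Int)))
instance (n : Int) (data : List (List Int)) : Decidable (Pre_find n data) := by
  unfold Pre_find; infer_instance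

def pvWitness_find : Int × List (List Int) := (3, [[1, 2, 1], [2, 1, 2], [1, 2, 1]])

def Spec_find (n : Int) (data : List (List Int)) (out : String) : Prop := out = find_alt n data
instance (n : Int) (data : List (List Int)) (out : String) : Decidable (Spec_find n data out) := by
  unfold Spec_find; infer_instance

-- ===== CLAIM (what is proved, stated in full; the proofs are below) =====
def Claim_equal_find : Prop :=
  ∀ (n : Int) (data : List (List Int)), Dom_find n data → Pre_find n data →
    Spec_find n data (find n data)

-- ===== LEMMAS AND PROOFS =====

-- the common characterisation both programs decide
def pvGood (n t f : Int) (data : List (List Int)) : Prop :=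
  ∀ i ∈ PySem.List.pyRange 0 n 1, ∀ j ∈ PySem.List.pyRange 0 n 1,
    pvCell data i j = (if i = j ∨ i + j = n - 1 then t else f)

-- A's inner loop completes iff every visited cell carries its template value
theorem rowA_eq_all (n t f : Int) (data : List (List Int)) (i : Int) (js : List Int) :
    pvRowA n t f data i js =
      js.all (fun j => pvCell data i j = (if i = j ∨ i + j = n - 1 then t else f)) := by
  induction js with
  | nil => rfl
  | cons j js ih =>
    simp only [pvRowA, List.all_cons]
    split_ifs with h1 h2 h2 <;> simp_all

theorem loopA_char (n t f : Int) (data : List (List Int)) (is : List Int) :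
    pvLoopA n t f data is =
      if is.all (fun i => pvRowA n t f data i (PySem.List.pyRange 0 n 1)) then "YES" else "NO" := by
  induction is with
  | nil => rfl
  | cons i is ih =>
    simp only [pvLoopA, List.all_cons]
    by_cases h : pvRowA n t f data i (PySem.List.pyRange 0 n 1) = true
    · simp [h, ih]
    · simp [h]

theorem allA_iff (n t f : Int) (data : List (List Int)) :
    ((PySem.List.pyRange 0 n 1).all
        (fun i => pvRowA n t f data i (PySem.List.pyRange 0 n 1))) = true ↔
      pvGood n t f data := by
  simp only [List.all_eq_true, rowA_eq_all, decide_eq_true_eq, pvGood]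

theorem find_yes (n : Int) (data : List (List Int)) (t f : Int)
    (ht : t = pvCell data 0 0) (hf : f = pvCell data 0 1) (hne : t ≠ f)
    (hG : pvGood n t f data) : find n data = "YES" := by
  subst ht hf
  simp only [find, if_neg hne, loopA_char]
  rw [if_pos ((allA_iff n _ _ data).mpr hG)]

theorem find_no (n : Int) (data : List (List Int)) (t f : Int)
    (ht : t = pvCell data 0 0) (hf : f = pvCell data 0 1) (hne : t ≠ f)
    (hG : ¬ pvGood n t f data) : find n data = "NO" := by
  subst ht hf
  simp only [find, if_neg hne, loopA_char]
  rw [if_neg (fun h => hG ((allA_iff n _ _ data).mp h))]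

theorem mem_cellsB (n : Int) (data : List (List Int)) (c : Int × Int × Int) :
    c ∈ pvCellsB n data ↔
      ∃ i ∈ PySem.List.pyRange 0 n 1, ∃ j ∈ PySem.List.pyRange 0 n 1,
        c = (i, j, pvCell data i j) := by
  simp [pvCellsB, List.mem_flatMap, eq_comm]

theorem mem_diagB (n : Int) (p : Int × Int) :
    p ∈ pvDiagB n ↔
      (∃ i ∈ PySem.List.pyRange 0 n 1, p = (i, i)) ∨
      (∃ i ∈ PySem.List.pyRange 0 n 1, p = (i, n - 1 - i)) := by
  simp [pvDiagB, PySem.Set.mem_union, PySem.Set.mem_ofList, eq_comm]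

theorem mem_gotB (n : Int) (data : List (List Int)) (t : Int) (p : Int × Int) :
    p ∈ pvGotB (pvCellsB n data) t ↔
      ∃ i ∈ PySem.List.pyRange 0 n 1, ∃ j ∈ PySem.List.pyRange 0 n 1,
        pvCell data i j = t ∧ p = (i, j) := by
  simp only [pvGotB, PySem.Set.mem_ofList, List.mem_filterMap]
  constructor
  · rintro ⟨c, hc, hv⟩
    rw [mem_cellsB] at hc
    obtain ⟨i, hi, j, hj, rfl⟩ := hc
    simp only [] at hv
    split_ifs at hv with h
    · exact ⟨i, hi, j, hj, h, by simpa using hv.symm⟩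
  · rintro ⟨i, hi, j, hj, h, rfl⟩
    exact ⟨(i, j, pvCell data i j), (mem_cellsB n data _).mpr ⟨i, hi, j, hj, rfl⟩, by simp [h]⟩

theorem find_alt_yes (n : Int) (data : List (List Int)) (t f : Int)
    (ht : t = pvCell data 0 0) (hf : f = pvCell data 0 1) (hne : t ≠ f)
    (hG : pvGood n t f data) : find_alt n data = "YES" := by
  subst ht hf
  set t := pvCell data 0 0 with ht
  set f := pvCell data 0 1 with hf
  simp only [find_alt, ← ht, ← hf, if_neg hne]
  have hany : (pvCellsB n data).any (fun c => c.2.2 ≠ t ∧ c.2.2 ≠ f) = false := by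
    rw [List.any_eq_false]
    intro c hc
    rw [mem_cellsB] at hc
    obtain ⟨i, hi, j, hj, rfl⟩ := hc
    have := hG i hi j hj
    simp only [decide_eq_true_eq]
    split_ifs at this <;> simp [this]
  rw [if_neg (by rw [hany]; exact Bool.false_ne_true)]
  have heq : PySem.Set.equal (pvGotB (pvCellsB n data) t) (pvDiagB n) = true := by
    rw [PySem.Set.equal_iff]
    intro p
    rw [mem_gotB, mem_diagB]
    constructor
    · rintro ⟨i, hi, j, hj, hv, rfl⟩
      have := hG i hi j hj
      rw [hv] at this
      split_ifs at this with hd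
      · rcases hd with hd | hd
        · exact Or.inl ⟨i, hi, by rw [hd]⟩
        · exact Or.inr ⟨i, hi, by rw [show j = n - 1 - i by omega]⟩
      · exact absurd this hne
    · rintro (⟨i, hi, rfl⟩ | ⟨i, hi, rfl⟩)
      · refine ⟨i, hi, i, hi, ?_, rfl⟩
        have := hG i hi i hi
        simpa using this
      · have hi' := hi
        rw [PySem.List.mem_pyRange_one] at hi'
        have hj : n - 1 - i ∈ PySem.List.pyRange 0 n 1 := by
          rw [PySem.List.mem_pyRange_one]; omega
        refine ⟨i, hi, n - 1 - i, hj, ?_, rfl⟩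
        have := hG i hi _ hj
        rw [if_pos (Or.inr (by omega))] at this
        exact this
  rw [if_pos heq]

theorem find_alt_no (n : Int) (data : List (List Int)) (t f : Int)
    (ht : t = pvCell data 0 0) (hf : f = pvCell data 0 1) (hne : t ≠ f)
    (hG : ¬ pvGood n t f data) : find_alt n data = "NO" := by
  subst ht hf
  set t := pvCell data 0 0 with ht
  set f := pvCell data 0 1 with hf
  simp only [find_alt, ← ht, ← hf, if_neg hne]
  by_cases hany : (pvCellsB n data).any (fun c => c.2.2 ≠ t ∧ c.2.2 ≠ f) = true
  · rw [if_pos hany]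
  · rw [if_neg hany]
    rw [Bool.not_eq_true, List.any_eq_false] at hany
    have heq : PySem.Set.equal (pvGotB (pvCellsB n data) t) (pvDiagB n) = false := by
      by_contra hcne
      rw [Bool.not_eq_false, PySem.Set.equal_iff] at hcne
      apply hG
      intro i hi j hj
      have hmem : (i, j, pvCell data i j) ∈ pvCellsB n data :=
        (mem_cellsB n data _).mpr ⟨i, hi, j, hj, rfl⟩
      have htf := hany _ hmem
      simp only [decide_eq_true_eq, not_and, not_not] at htf
      have hi' := hi; rw [PySem.List.mem_pyRange_one] at hi'
      have hj' := hj; rw [PySem.List.mem_pyRange_one] at hj'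
      by_cases hd : i = j ∨ i + j = n - 1
      · rw [if_pos hd]
        have hdiag : (i, j) ∈ pvDiagB n := by
          rw [mem_diagB]
          rcases hd with hd | hd
          · exact Or.inl ⟨i, hi, by rw [hd]⟩
          · exact Or.inr ⟨i, hi, by rw [show j = n - 1 - i by omega]⟩
        have hgot := (hcne (i, j)).mpr hdiag
        rw [mem_gotB] at hgot
        obtain ⟨i', hi2, j', hj2, hv', hp⟩ := hgot
        have hpe : i = i' ∧ j = j' := by simpa [Prod.ext_iff] using hp
        obtain ⟨rfl, rfl⟩ := hpe
        exact hv'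
      · rw [if_neg hd]
        refine htf ?_
        intro hv
        have hgot : (i, j) ∈ pvGotB (pvCellsB n data) t :=
          (mem_gotB n data t _).mpr ⟨i, hi, j, hj, hv, rfl⟩
        have hdiag := (hcne (i, j)).mp hgot
        rw [mem_diagB] at hdiag
        rcases hdiag with ⟨i', hi2, hp⟩ | ⟨i', hi2, hp⟩
        · have h12 : i = i' ∧ j = i' := by simpa [Prod.ext_iff] using hp
          exact hd (Or.inl (by omega))
        · have h12 : i = i' ∧ j = n - 1 - i' := by simpa [Prod.ext_iff] using hp
          exact hd (Or.inr (by omega))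
    rw [if_neg (by rw [heq]; exact Bool.false_ne_true)]

-- ===== VERDICT (by name: the statement is the Claim_ definition above) =====
theorem find_spec : Claim_equal_find := by
  intro n data _ _
  unfold Spec_find
  by_cases h : pvCell data 0 0 = pvCell data 0 1
  · simp [find, find_alt, h]
  · by_cases hG : pvGood n (pvCell data 0 0) (pvCell data 0 1) data
    · rw [find_yes n data _ _ rfl rfl h hG, find_alt_yes n data _ _ rfl rfl h hG]
    · rw [find_no n data _ _ rfl rfl h hG, find_alt_no n data _ _ rfl rfl h hG]
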